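/- GENERATED by c/gen_decode.py: decode facts of the image, one per distinct instruction byte string. -/
import UserX.DecodeImage

#decode_all Vorbis.Dec
  "09c2"  -- or edx,eax
  "0f8423020000"  -- je 114825
  "0f84d6feffff"  -- je 10f141
  "0f87d2000000"  -- ja 11647b
  "0f8ec2000000"  -- jle 10d6d1
  "0fb65d00"  -- movzx ebx,BYTE PTR [rbp+0x0]
  "390424"  -- cmp DWORD PTR [rsp],eax
  "410faf442408"  -- imul eax,DWORD PTR [r12+0x8]
  "4139c7"  -- cmp r15d,eax
  "4183fd05"  -- cmp r13d,0x5
  "418b06"  -- mov eax,DWORD PTR [r14]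
  "41c644240200"  -- mov BYTE PTR [r12+0x2],0x0
  "428d0c38"  -- lea ecx,[rax+r15*1]
  "44397c241c"  -- cmp DWORD PTR [rsp+0x1c],r15d
  "44896bd0"  -- mov DWORD PTR [rbx-0x30],r13d
  "4489e6"  -- mov esi,r12d
  "448b7d04"  -- mov r15d,DWORD PTR [rbp+0x4]
  "450fb77702"  -- movzx r14d,WORD PTR [r15+0x2]
  "4589f5"  -- mov r13d,r14d
  "478d7c2620"  -- lea r15d,[r14+r12*1+0x20]
  "4863542438"  -- movsxd rdx,DWORD PTR [rsp+0x38]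
  "4881ec98050000"  -- sub rsp,0x598
  "4885ff"  -- test rdi,rdi
  "4889ca"  -- mov rdx,rcx
  "488b5c2440"  -- mov rbx,QWORD PTR [rsp+0x40]
  "488d04dd17000000"  -- lea rax,[rbx*8+0x17]
  "488d7b04"  -- lea rdi,[rbx+0x4]
  "488d7e19"  -- lea rdi,[rsi+0x19]
  "488dbbd8060000"  -- lea rdi,[rbx+0x6d8]
  "488dbfd4060000"  -- lea rdi,[rdi+0x6d4]
  "48c7830000c00000000000"  -- mov QWORD PTR [rbx+0xc00000],0x0
  "4963c5"  -- movsxd rax,r13d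
  "4989ec"  -- mov r12,rbp
  "498d7c24f0"  -- lea rdi,[r12-0x10]
  "498dbee4060000"  -- lea rdi,[r14+0x6e4]
  "4a8d94eb78050000"  -- lea rdx,[rbx+r13*8+0x578]
  "4c39e5"  -- cmp rbp,r12
  "4c89c5"  -- mov rbp,r8
  "4c8ba550ffffff"  -- mov r12,QWORD PTR [rbp-0xb0]
  "4c8db0b0000000"  -- lea r14,[rax+0xb0]
  "4d8d241f"  -- lea r12,[r15+rbx*1]
  "660f28d9"  -- movapd xmm3,xmm1
  "66410f6eed"  -- movd xmm5,r13d
  "66837b0400"  -- cmp WORD PTR [rbx+0x4],0x0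
  "7420"  -- je 106fa0
  "750c"  -- jne 114fff
  "7749"  -- ja 100257
  "7e10"  -- jle 1116af
  "7fc6"  -- jg 115455
  "83bbd8060000ff"  -- cmp DWORD PTR [rbx+0x6d8],0xffffffff
  "88442410"  -- mov BYTE PTR [rsp+0x10],al
  "8974241c"  -- mov DWORD PTR [rsp+0x1c],esi
  "89f1"  -- mov ecx,esi
  "8b5c2438"  -- mov ebx,DWORD PTR [rsp+0x38]
  "8b9424c00b0000"  -- mov edx,DWORD PTR [rsp+0xbc0]
  "b920000000"  -- mov ecx,0x20
  "c1ef15"  -- shr edi,0x15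
  "c780e806000000000000"  -- mov DWORD PTR [rax+0x6e8],0x0
  "e80013ffff"  -- call 100800
  "e809f5feff"  -- call 100800
  "e814b3feff"  -- call 100300
  "e81cc1ffff"  -- call 100640
  "e8282fffff"  -- call 100640
  "e82ff4feff"  -- call 100300
  "e83a91ffff"  -- call 10d040
  "e845a5ffff"  -- call 100640
  "e84fb5ffff"  -- call 100640
  "e85af8feff"  -- call 103d00
  "e86991ffff"  -- call 100800
  "e874bdfeff"  -- call 1003c0
  "e87f0affff"  -- call 100300
  "e88a7effff"  -- call 100640
  "e8940effff"  -- call 100800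
  "e89e77ffff"  -- call 10d1c0
  "e8a8b6ffff"  -- call 107f00
  "e8b29effff"  -- call 10d1c0
  "e8bc50ffff"  -- call 100300
  "e8c776ffff"  -- call 10d1c0
  "e8d0acffff"  -- call 100640
  "e8db13ffff"  -- call 100800
  "e8e4b6feff"  -- call 100640
  "e8eceefeff"  -- call 100800
  "e8f7a3ffff"  -- call 100640
  "e90cfeffff"  -- jmp 1119ed
  "e951f9ffff"  -- jmp 113b22
  "e9a4000000"  -- jmp 10d775
  "e9f5fcffff"  -- jmp 113b22
  "eb86"  -- jmp 10d66d
  "ebe3"  -- jmp 102d05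
  "f20f5805cdda0100"  -- addsd xmm0,QWORD PTR [rip+0x1dacd]
  "f20f5e15cbda0100"  -- divsd xmm2,QWORD PTR [rip+0x1dacb]
  "f30f1053ec"  -- movss xmm2,DWORD PTR [rbx-0x14]
  "f30f1075b0"  -- movss xmm6,DWORD PTR [rbp-0x50]
  "f30f11542404"  -- movss DWORD PTR [rsp+0x4],xmm2
  "f30f1175c0"  -- movss DWORD PTR [rbp-0x40],xmm6
  "f30f58e1"  -- addss xmm4,xmm1
  "f30f59f7"  -- mulss xmm6,xmm7
  "f3410f10442410"  -- movss xmm0,DWORD PTR [r12+0x10]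
  "f3410f594d00"  -- mulss xmm1,DWORD PTR [r13+0x0]
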